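-- pv_equiv track=rewrite | github.com/amitcjmu/Stock-Analysis | backend/app/services/crewai_flows/tools/critical_attributes_tool/assessment.py | _build_category_coverage
-- ===== SOURCE A (Python) =====
-- from typing import Any, Dict, List
--
-- def _build_category_coverage(
--     covered_attributes: List[str], attribute_details: Dict[str, Dict[str, Any]]
-- ) -> Dict[str, int]:
--     """Build category coverage metrics"""
--     return {
--         "infrastructure": len(
--             [
--                 a
--                 for a in covered_attributes
--                 if attribute_details[a]["category"] == "infrastructure"
--             ]
--         ),
--         "application": len(
--             [
--                 a
--                 for a in covered_attributes
--                 if attribute_details[a]["category"] == "application"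
--             ]
--         ),
--         "business": len(
--             [
--                 a
--                 for a in covered_attributes
--                 if attribute_details[a]["category"] == "business"
--             ]
--         ),
--         "technical_debt": len(
--             [
--                 a
--                 for a in covered_attributes
--                 if attribute_details[a]["category"] == "technical_debt"
--             ]
--         ),
--     }
-- ===== SOURCE B (Python) =====
-- from typing import Any, Dict, List
--
-- def _build_category_coverage(
--     covered_attributes: List[str], attribute_details: Dict[str, Dict[str, Any]]
-- ) -> Dict[str, int]:
--     """Build category coverage metrics (single counting pass)."""
--     result = {"infrastructure": 0, "application": 0, "business": 0, "technical_debt": 0}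
--     for a in covered_attributes:
--         cat = attribute_details[a]["category"]
--         if cat in result:
--             result[cat] += 1
--     return result
-- ===== Notes on version B (the rewrite author's own statement) =====
-- stated objective: simpler
-- what changed: Replaces four separate filtering scans over covered_attributes (one per category) by a single counting pass that increments the matching bucket of a pre-initialized ordered dict.
import Mathlib
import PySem

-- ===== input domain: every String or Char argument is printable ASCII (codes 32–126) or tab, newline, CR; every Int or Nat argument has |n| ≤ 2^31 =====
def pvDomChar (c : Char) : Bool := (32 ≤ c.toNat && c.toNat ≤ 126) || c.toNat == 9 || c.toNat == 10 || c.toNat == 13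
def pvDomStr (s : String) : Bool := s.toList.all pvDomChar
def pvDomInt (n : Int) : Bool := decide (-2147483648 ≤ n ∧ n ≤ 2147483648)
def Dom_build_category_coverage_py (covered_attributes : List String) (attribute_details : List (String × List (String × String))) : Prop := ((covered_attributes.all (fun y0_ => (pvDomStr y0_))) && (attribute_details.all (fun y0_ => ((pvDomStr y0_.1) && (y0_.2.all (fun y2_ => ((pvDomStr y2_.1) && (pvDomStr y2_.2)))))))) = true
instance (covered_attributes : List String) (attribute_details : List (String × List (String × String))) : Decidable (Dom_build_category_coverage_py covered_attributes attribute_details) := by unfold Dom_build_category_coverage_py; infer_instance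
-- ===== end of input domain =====

-- B replaces A's four per-category filtering scans by one counting pass over an ordered 4-bucket dict (simpler, one traversal).

-- ===== PORT A =====
-- attribute_details[a]["category"]; under Pre_ both lookups hit (Python would raise KeyError otherwise)
def pvCatA (attribute_details : List (String × List (String × String))) (a : String) : String :=
  PySem.Dict.getD (PySem.Dict.mk (PySem.Dict.getD (PySem.Dict.mk attribute_details) a [])) "category" ""

def build_category_coverage_py (covered_attributes : List String) (attribute_details : List (String × List (String × String))) : List (String × Int) :=
  [ ("infrastructure", ((covered_attributes.filter (fun a => pvCatA attribute_details a == "infrastructure")).length : Int)),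
    ("application",    ((covered_attributes.filter (fun a => pvCatA attribute_details a == "application")).length : Int)),
    ("business",       ((covered_attributes.filter (fun a => pvCatA attribute_details a == "business")).length : Int)),
    ("technical_debt", ((covered_attributes.filter (fun a => pvCatA attribute_details a == "technical_debt")).length : Int)) ]

-- ===== PORT B =====
def pvStepB (attribute_details : List (String × List (String × String))) (res : PySem.Dict String Int) (a : String) : PySem.Dict String Int :=
  let cat := pvCatA attribute_details a
  if PySem.Dict.contains res cat then PySem.Dict.modify res cat 0 (· + 1) else res

def build_category_coverage_py_alt (covered_attributes : List String) (attribute_details : List (String × List (String × String))) : List (String × Int) :=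
  (covered_attributes.foldl (pvStepB attribute_details)
    (PySem.Dict.mk [("infrastructure", 0), ("application", 0), ("business", 0), ("technical_debt", 0)])).items

-- ===== PRECONDITION & SPEC =====
-- Pre_ excludes exactly the inputs where Python A raises KeyError: some covered attribute is not a
-- key of attribute_details, or its detail dict lacks a "category" key.
def Pre_build_category_coverage_py (covered_attributes : List String) (attribute_details : List (String × List (String × String))) : Prop :=
  ∀ a ∈ covered_attributes,
    PySem.Dict.contains (PySem.Dict.mk attribute_details) a = true ∧
    PySem.Dict.contains (PySem.Dict.mk (PySem.Dict.getD (PySem.Dict.mk attribute_details) a [])) "category" = true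
instance (covered_attributes : List String) (attribute_details : List (String × List (String × String))) : Decidable (Pre_build_category_coverage_py covered_attributes attribute_details) := by unfold Pre_build_category_coverage_py; infer_instance

def pvWitness_build_category_coverage_py : List String × (List (String × List (String × String))) :=
  (["cpu", "roi"], [("cpu", [("category", "infrastructure")]), ("roi", [("category", "business")])])

def Spec_build_category_coverage_py (covered_attributes : List String) (attribute_details : List (String × List (String × String))) (out : List (String × Int)) : Prop := out = build_category_coverage_py_alt covered_attributes attribute_details
instance (covered_attributes : List String) (attribute_details : List (String × List (String × String))) (out : List (String × Int)) : Decidable (Spec_build_category_coverage_py covered_attributes attribute_details out) := by unfold Spec_build_category_coverage_py; infer_instance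

-- ===== CLAIM (what is proved, stated in full; the proofs are below) =====
def Claim_equal_build_category_coverage_py : Prop := ∀ (covered_attributes : List String) (attribute_details : List (String × List (String × String))), Dom_build_category_coverage_py covered_attributes attribute_details → Pre_build_category_coverage_py covered_attributes attribute_details → Spec_build_category_coverage_py covered_attributes attribute_details (build_category_coverage_py covered_attributes attribute_details)

-- ===== LEMMAS AND PROOFS =====

-- Loop invariant for B: folding over the attributes adds each category's count to its bucket.
lemma pvLoopB (attribute_details : List (String × List (String × String)))
    (covered : List String) (i p b t : Int) :
    covered.foldl (pvStepB attribute_details)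
      (PySem.Dict.mk [("infrastructure", i), ("application", p), ("business", b), ("technical_debt", t)]) =
    PySem.Dict.mk
      [ ("infrastructure", i + (covered.countP (fun a => pvCatA attribute_details a == "infrastructure") : Int)),
        ("application",    p + (covered.countP (fun a => pvCatA attribute_details a == "application") : Int)),
        ("business",       b + (covered.countP (fun a => pvCatA attribute_details a == "business") : Int)),
        ("technical_debt", t + (covered.countP (fun a => pvCatA attribute_details a == "technical_debt") : Int)) ] := by
  induction covered generalizing i p b t with
  | nil => simp [List.countP]
  | cons a rest ih =>
    simp only [List.foldl_cons]
    by_cases h1 : pvCatA attribute_details a = "infrastructure"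
    · rw [show pvStepB attribute_details (PySem.Dict.mk [("infrastructure", i), ("application", p), ("business", b), ("technical_debt", t)]) a = PySem.Dict.mk [("infrastructure", i + 1), ("application", p), ("business", b), ("technical_debt", t)] by
        simp [pvStepB, h1, PySem.Dict.contains, PySem.Dict.modify, PySem.Dict.insert, PySem.Dict.getD, PySem.Dict.get?]]
      rw [ih]
      simp [h1]
      omega
    · by_cases h2 : pvCatA attribute_details a = "application"
      · rw [show pvStepB attribute_details (PySem.Dict.mk [("infrastructure", i), ("application", p), ("business", b), ("technical_debt", t)]) a = PySem.Dict.mk [("infrastructure", i), ("application", p + 1), ("business", b), ("technical_debt", t)] by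
          simp [pvStepB, h2, PySem.Dict.contains, PySem.Dict.modify, PySem.Dict.insert, PySem.Dict.getD, PySem.Dict.get?]]
        rw [ih]
        simp [h2]
        omega
      · by_cases h3 : pvCatA attribute_details a = "business"
        · rw [show pvStepB attribute_details (PySem.Dict.mk [("infrastructure", i), ("application", p), ("business", b), ("technical_debt", t)]) a = PySem.Dict.mk [("infrastructure", i), ("application", p), ("business", b + 1), ("technical_debt", t)] by
            simp [pvStepB, h3, PySem.Dict.contains, PySem.Dict.modify, PySem.Dict.insert, PySem.Dict.getD, PySem.Dict.get?]]
          rw [ih]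
          simp [h3]
          omega
        · by_cases h4 : pvCatA attribute_details a = "technical_debt"
          · rw [show pvStepB attribute_details (PySem.Dict.mk [("infrastructure", i), ("application", p), ("business", b), ("technical_debt", t)]) a = PySem.Dict.mk [("infrastructure", i), ("application", p), ("business", b), ("technical_debt", t + 1)] by
              simp [pvStepB, h4, PySem.Dict.contains, PySem.Dict.modify, PySem.Dict.insert, PySem.Dict.getD, PySem.Dict.get?]]
            rw [ih]
            simp [h4]
            omega
          · rw [show pvStepB attribute_details (PySem.Dict.mk [("infrastructure", i), ("application", p), ("business", b), ("technical_debt", t)]) a = PySem.Dict.mk [("infrastructure", i), ("application", p), ("business", b), ("technical_debt", t)] by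
              simp [pvStepB, PySem.Dict.contains, Ne.symm h1, Ne.symm h2, Ne.symm h3, Ne.symm h4]]
            rw [ih]
            simp [h1, h2, h3, h4]

-- ===== VERDICT (by name: the statement is the Claim_ definition above) =====
theorem build_category_coverage_py_spec : Claim_equal_build_category_coverage_py := by
  intro covered attrs _ _
  show build_category_coverage_py covered attrs = build_category_coverage_py_alt covered attrs
  unfold build_category_coverage_py build_category_coverage_py_alt
  rw [pvLoopB]
  simp [List.countP_eq_length_filter]
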